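-- pv_equiv track=rewrite | github.com/Lightblues/Leetcode | LC-contest/251-300/295.py | totalSteps
-- ===== SOURCE A (Python) =====
-- from typing import List
--
-- def totalSteps(nums: List[int]) -> int:
--     """ [here](https://leetcode.cn/problems/steps-to-make-array-non-decreasing/solution/by-endlesscheng-s2yc/)
--     """
--     # 栈内元素为 (num, maxt) 其中第二个数字是它被移除的时刻
--     stack = []
--     ans = 0
--     for num in nums:
--         maxt = 0    # 记录num左侧的元素的小于等于num的元素的最大移除时间
--         # 注意这里是 <=. 相等的时候, 1) 若num被保留, 下面的 `if stack` 语句确保了其移除时间的记录为 0; 2) num被移除, 则其被移除的时刻同样取决于上一个值为 num的元素. 例如 [3,1,2,1,2] 中两个2的移除时刻分别为 2,3.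
--         while stack and stack[-1][0] <= num:
--             maxt = max(maxt, stack.pop()[1])
--         # 若栈为空, 说明是新的最大元素, 其被移除的时刻为 0; 否则, 该元素会被移除, 其被移除的时刻为 maxt+1.
--         if stack: maxt += 1
--         ans = max(ans, maxt)
--         stack.append((num, maxt))
--     return ans
-- ===== SOURCE B (Python) =====
-- from typing import List
--
-- def totalSteps(nums: List[int]) -> int:
--     # Round-based simulation: each round simultaneously removes every element
--     # strictly smaller than its left neighbor (decided against the pre-removal
--     # list); count rounds until a pass removes nothing.
--     cur = list(nums)
--     ans = 0
--     while True:
--         new = [x for i, x in enumerate(cur) if i == 0 or x >= cur[i - 1]]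
--         if new == cur:
--             return ans
--         cur = new
--         ans += 1
-- ===== Notes on version B (the rewrite author's own statement) =====
-- stated objective: simpler
-- what changed: Replaced the monotonic stack of (value, removal-time) pairs and its running maximum by a direct round-based simulation: repeatedly drop every element strictly smaller than its left neighbor (simultaneously per pass) and count the passes until the list is stable.
import Mathlib
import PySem

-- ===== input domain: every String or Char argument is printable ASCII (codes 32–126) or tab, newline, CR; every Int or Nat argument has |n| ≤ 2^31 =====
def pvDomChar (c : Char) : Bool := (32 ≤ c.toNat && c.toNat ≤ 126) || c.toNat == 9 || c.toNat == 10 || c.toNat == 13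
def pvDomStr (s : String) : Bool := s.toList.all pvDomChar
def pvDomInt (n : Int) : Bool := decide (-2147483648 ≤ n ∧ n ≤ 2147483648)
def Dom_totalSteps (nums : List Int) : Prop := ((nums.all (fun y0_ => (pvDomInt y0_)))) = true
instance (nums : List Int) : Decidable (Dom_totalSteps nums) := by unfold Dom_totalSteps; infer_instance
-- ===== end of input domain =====

-- B replaces A's monotonic stack of (value, removal-time) pairs by a direct
-- round-based simulation (drop every element strictly smaller than its left
-- neighbor, simultaneously per pass, counting passes): simpler.

-- ===== PORT A =====
-- `while stack and stack[-1][0] <= num: maxt = max(maxt, stack.pop()[1])`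
-- (head of the list is the top of the stack)
def popLoop (stack : List (Int × Int)) (num : Int) (maxt : Int) : List (Int × Int) × Int :=
  match stack with
  | [] => ([], maxt)
  | (v, t) :: rest => if v ≤ num then popLoop rest num (max maxt t) else ((v, t) :: rest, maxt)

-- one iteration of A's `for num in nums` loop over the state (stack, ans)
def stepA (st : List (Int × Int) × Int) (num : Int) : List (Int × Int) × Int :=
  let (stack, ans) := st
  let (stack, maxt) := popLoop stack num 0
  let maxt := if stack ≠ [] then maxt + 1 else maxt
  ((num, maxt) :: stack, max ans maxt)

def totalSteps (nums : List Int) : Int :=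
  (nums.foldl stepA ([], 0)).2

-- ===== PORT B =====
-- `[x for i, x in enumerate(cur) if i == 0 or x >= cur[i-1]]`: keep x iff prev <= x,
-- always comparing against the pre-removal list
def pvKeep (prev : Int) : List Int → List Int
  | [] => []
  | x :: rest => if prev ≤ x then x :: pvKeep x rest else pvKeep x rest

def pvRound (l : List Int) : List Int :=
  match l with
  | [] => []
  | h :: t => h :: pvKeep h t

-- termination facts for B's `while` loop (cited by decreasing_by)
lemma pvKeep_length_le (prev : Int) (l : List Int) : (pvKeep prev l).length ≤ l.length := by
  induction l generalizing prev with
  | nil => simp [pvKeep]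
  | cons x rest ih =>
    simp only [pvKeep]
    split
    · simpa using ih x
    · exact Nat.le_succ_of_le (ih x)

lemma pvKeep_eq_or_lt (prev : Int) (l : List Int) :
    pvKeep prev l = l ∨ (pvKeep prev l).length < l.length := by
  induction l generalizing prev with
  | nil => left; rfl
  | cons x rest ih =>
    simp only [pvKeep]
    split
    · rcases ih x with h | h
      · left; rw [h]
      · right; simpa using h
    · right; exact Nat.lt_succ_of_le (pvKeep_length_le x rest)

lemma pvRound_length_lt (l : List Int) (h : pvRound l ≠ l) : (pvRound l).length < l.length := by
  cases l with
  | nil => simp [pvRound] at h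
  | cons x rest =>
    simp only [pvRound] at h ⊢
    rcases pvKeep_eq_or_lt x rest with h' | h'
    · exact absurd (by rw [h']) h
    · simpa using h'

def totalSteps_alt (nums : List Int) : Int :=
  if h : pvRound nums = nums then 0 else 1 + totalSteps_alt (pvRound nums)
termination_by nums.length
decreasing_by exact pvRound_length_lt nums h

-- ===== PRECONDITION & SPEC =====
def Spec_totalSteps (nums : List Int) (out : Int) : Prop := out = totalSteps_alt nums
instance (nums : List Int) (out : Int) : Decidable (Spec_totalSteps nums out) := by unfold Spec_totalSteps; infer_instance

-- ===== CLAIM (what is proved, stated in full; the proofs are below) =====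
def Claim_equal_totalSteps : Prop := ∀ (nums : List Int), Dom_totalSteps nums → Spec_totalSteps nums (totalSteps nums)

-- ===== LEMMAS AND PROOFS =====

-- A's fold from the initial state
def foldA (l : List Int) : List (Int × Int) × Int := l.foldl stepA ([], 0)

-- invariant of A's stack: values strictly increase from top (head) to bottom,
-- every non-bottom time is ≥ 1, the bottom time is ≥ 0
def GoodStack : List (Int × Int) → Prop
  | [] => True
  | [(_, t)] => 0 ≤ t
  | (v, t) :: (w, s) :: rest => v < w ∧ 1 ≤ t ∧ GoodStack ((w, s) :: rest)

-- how one simulation round transforms A's stack: drop non-bottom entries of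
-- time 1, decrement the other times (bottom clipped at 0)
def decStack : List (Int × Int) → List (Int × Int)
  | [] => []
  | [(v, t)] => [(v, max (t - 1) 0)]
  | (v, t) :: p :: rest => if t = 1 then decStack (p :: rest) else (v, t - 1) :: decStack (p :: rest)

lemma stepA_eq (S R : List (Int × Int)) (a m x : Int) (h : popLoop S x 0 = (R, m)) :
    stepA (S, a) x = ((x, if R ≠ [] then m + 1 else m) :: R, max a (if R ≠ [] then m + 1 else m)) := by
  simp [stepA, h]

lemma foldA_append (l : List Int) (x : Int) : foldA (l ++ [x]) = stepA (foldA l) x := by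
  simp [foldA, List.foldl_append]

lemma GoodStack_tail (q : Int × Int) (S : List (Int × Int)) (h : GoodStack (q :: S)) :
    GoodStack S := by
  cases S with
  | nil => trivial
  | cons p rest =>
    obtain ⟨v, t⟩ := q; obtain ⟨w, s⟩ := p
    exact h.2.2

lemma GoodStack_times_nonneg (S : List (Int × Int)) (h : GoodStack S) :
    ∀ p ∈ S, 0 ≤ p.2 := by
  induction S with
  | nil => simp
  | cons q rest ih =>
    intro p hp
    rcases List.mem_cons.mp hp with hp | hp
    · subst hp
      cases rest with
      | nil => obtain ⟨v, t⟩ := p; exact h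
      | cons r rest' =>
        obtain ⟨v, t⟩ := p; obtain ⟨w, s⟩ := r
        exact le_of_lt (lt_of_lt_of_le Int.zero_lt_one h.2.1)
    · exact ih (GoodStack_tail q rest h) p hp

lemma GoodStack_head_lt (v t : Int) (S : List (Int × Int)) (h : GoodStack ((v, t) :: S)) :
    ∀ q ∈ S, v < q.1 := by
  induction S generalizing v t with
  | nil => simp
  | cons r rest ih =>
    obtain ⟨w, s⟩ := r
    intro q hq
    rcases List.mem_cons.mp hq with hq | hq
    · subst hq; exact h.1
    · exact lt_trans h.1 (ih w s h.2.2 q hq)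

lemma popLoop_good (S : List (Int × Int)) (x : Int) (h : GoodStack S) :
    ∀ m₀, GoodStack (popLoop S x m₀).1 := by
  induction S with
  | nil => intro m₀; trivial
  | cons q rest ih =>
    intro m₀
    obtain ⟨v, t⟩ := q
    simp only [popLoop]
    split
    · exact ih (GoodStack_tail (v, t) rest h) _
    · exact h

lemma popLoop_head_gt (x : Int) :
    ∀ (S : List (Int × Int)) (m₀ w s : Int) (T : List (Int × Int)),
      (popLoop S x m₀).1 = (w, s) :: T → x < w := by
  intro S
  induction S with
  | nil => intro m₀ w s T h; simp [popLoop] at h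
  | cons q rest ih =>
    intro m₀ w s T h
    obtain ⟨v, t⟩ := q
    simp only [popLoop] at h
    split at h
    · exact ih _ w s T h
    · rename_i hv
      simp at h
      omega

lemma popLoop_noPop (S : List (Int × Int)) (x m₀ : Int) (h : ∀ p ∈ S, x < p.1) :
    popLoop S x m₀ = (S, m₀) := by
  cases S with
  | nil => rfl
  | cons q rest =>
    obtain ⟨v, t⟩ := q
    have hv : x < v := h (v, t) (by simp)
    simp [popLoop, (not_le.mpr hv : ¬ v ≤ x)]

lemma decStack_vals (S : List (Int × Int)) (x : Int) (h : ∀ p ∈ S, x < p.1) :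
    ∀ q ∈ decStack S, x < q.1 := by
  induction S with
  | nil => simp [decStack]
  | cons q rest ih =>
    obtain ⟨v, t⟩ := q
    cases rest with
    | nil =>
      intro p hp
      simp only [decStack, List.mem_singleton] at hp
      subst hp
      exact h (v, t) (by simp)
    | cons r rest' =>
      intro p hp
      simp only [decStack] at hp
      split at hp
      · exact ih (fun q hq => h q (List.mem_cons_of_mem _ hq)) p hp
      · rcases List.mem_cons.mp hp with hp | hp
        · subst hp; exact h (v, t) (by simp)
        · exact ih (fun q hq => h q (List.mem_cons_of_mem _ hq)) p hp

lemma decStack_ne_nil (S : List (Int × Int)) (h : S ≠ []) : decStack S ≠ [] := by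
  induction S with
  | nil => exact absurd rfl h
  | cons q rest ih =>
    obtain ⟨v, t⟩ := q
    cases rest with
    | nil => simp [decStack]
    | cons r rest' =>
      simp only [decStack]
      split
      · exact ih (by simp)
      · simp

lemma decStack_times_nonneg (S : List (Int × Int)) (h : GoodStack S) :
    ∀ p ∈ decStack S, 0 ≤ p.2 := by
  induction S with
  | nil => simp [decStack]
  | cons q rest ih =>
    obtain ⟨v, t⟩ := q
    cases rest with
    | nil =>
      intro p hp
      simp only [decStack, List.mem_singleton] at hp
      subst hp
      simp
    | cons r rest' =>
      obtain ⟨w, s⟩ := r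
      intro p hp
      simp only [decStack] at hp
      split at hp
      · exact ih h.2.2 p hp
      · rcases List.mem_cons.mp hp with hp | hp
        · subst hp; have := h.2.1; simp; omega
        · exact ih h.2.2 p hp

lemma popLoop_acc (S : List (Int × Int)) (x : Int) :
    ∀ m₀, 0 ≤ m₀ → (∀ p ∈ S, 0 ≤ p.2) →
      popLoop S x m₀ = ((popLoop S x 0).1, max m₀ (popLoop S x 0).2) := by
  induction S with
  | nil => intro m₀ hm _; simp [popLoop]; omega
  | cons q rest ih =>
    intro m₀ hm hts
    obtain ⟨v, t⟩ := q
    have ht : 0 ≤ t := hts (v, t) (by simp)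
    have hrest : ∀ p ∈ rest, 0 ≤ p.2 := fun p hp => hts p (List.mem_cons_of_mem _ hp)
    simp only [popLoop]
    split
    · rw [ih (max m₀ t) (le_trans hm (le_max_left _ _)) hrest,
        ih (max 0 t) (le_max_left _ _) hrest]
      have h2 : 0 ≤ (popLoop rest x 0).2 := by
        have := ih 0 le_rfl hrest
        rw [this]
        exact le_max_left 0 _
      refine Prod.ext rfl ?_
      simp only
      omega
    · simp; omega

-- the crux: popping on the decremented stack mirrors popping on the stack
lemma popBoth (x : Int) :
    ∀ (S : List (Int × Int)), GoodStack S →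
      ∀ v t rest, S = (v, t) :: rest → v ≤ x →
        ((popLoop S x 0).1 = [] →
           popLoop (decStack S) x 0 = ([], max ((popLoop S x 0).2 - 1) 0) ∧ 0 ≤ (popLoop S x 0).2) ∧
        ((popLoop S x 0).1 ≠ [] →
           popLoop (decStack S) x 0 = (decStack (popLoop S x 0).1, (popLoop S x 0).2 - 1) ∧
             1 ≤ (popLoop S x 0).2) := by
  intro S
  induction S with
  | nil => intro _ v t rest h; simp at h
  | cons q tl ih =>
    intro hG v t rest heq hvx
    obtain ⟨q1, q2⟩ := q
    obtain ⟨h1, h2⟩ : (q1 = v ∧ q2 = t) ∧ tl = rest := by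
      constructor
      · constructor <;> [exact congrArg (fun l => (l.headD (0,0)).1) heq;
          exact congrArg (fun l => (l.headD (0,0)).2) heq]
      · exact congrArg List.tail heq
    obtain ⟨h1a, h1b⟩ := h1
    subst h1a; subst h1b; subst h2
    cases tl with
    | nil =>
      have ht : 0 ≤ q2 := hG
      have e1 : popLoop [(q1, q2)] x 0 = ([], q2) := by
        simp [popLoop, hvx]; omega
      have e2 : popLoop (decStack [(q1, q2)]) x 0 = ([], max (q2 - 1) 0) := by
        simp [decStack, popLoop, hvx]
      refine ⟨fun _ => ⟨?_, ?_⟩, fun hne => ?_⟩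
      · rw [e2, e1]
      · rw [e1]; exact ht
      · rw [e1] at hne; simp at hne
    | cons r tl' =>
      obtain ⟨w, s⟩ := r
      obtain ⟨hvw, ht1, hGtl⟩ := hG
      have htl_times := GoodStack_times_nonneg ((w, s) :: tl') hGtl
      have e0 : popLoop ((q1, q2) :: (w, s) :: tl') x 0
          = popLoop ((w, s) :: tl') x q2 := by
        show (if q1 ≤ x then popLoop ((w, s) :: tl') x (max 0 q2)
              else ((q1, q2) :: (w, s) :: tl', 0)) = _
        rw [if_pos hvx, show max (0 : Int) q2 = q2 from by omega]
      by_cases hw : w ≤ x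
      · -- recursive case: the next entry pops too
        have IH' := ih hGtl w s tl' rfl hw
        rcases hR : popLoop ((w, s) :: tl') x 0 with ⟨R₀, m₀⟩
        rw [hR] at IH'
        have eacc : popLoop ((w, s) :: tl') x q2 = (R₀, max q2 m₀) := by
          rw [popLoop_acc ((w, s) :: tl') x q2 (by omega) htl_times, hR]
        have eS : popLoop ((q1, q2) :: (w, s) :: tl') x 0 = (R₀, max q2 m₀) := by
          rw [e0, eacc]
        by_cases ht2 : q2 = 1
        · -- q2 = 1: this entry disappears from the decremented stack
          have edec : decStack ((q1, q2) :: (w, s) :: tl')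
              = decStack ((w, s) :: tl') := by
            simp [decStack, ht2]
          by_cases hR0 : R₀ = []
          · obtain ⟨ed, hm0⟩ := IH'.1 hR0
            refine ⟨fun _ => ⟨?_, ?_⟩, fun hne => ?_⟩
            · rw [edec, ed, eS]
              have : max (m₀ - 1) 0 = max (max q2 m₀ - 1) 0 := by omega
              rw [this]
            · rw [eS]; simp; omega
            · rw [eS] at hne; simp [hR0] at hne
          · obtain ⟨ed, hm1⟩ := IH'.2 hR0
            refine ⟨fun hc => ?_, fun _ => ⟨?_, ?_⟩⟩
            · rw [eS] at hc; exact absurd hc hR0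
            · rw [edec, ed, eS]
              have : m₀ - 1 = max q2 m₀ - 1 := by omega
              rw [this]
            · rw [eS]; simp; omega
        · -- q2 ≥ 2: this entry stays, with time q2 - 1
          have hq2 : 2 ≤ q2 := by omega
          have edec : decStack ((q1, q2) :: (w, s) :: tl')
              = (q1, q2 - 1) :: decStack ((w, s) :: tl') := by
            simp [decStack, ht2]
          have hdect := decStack_times_nonneg ((w, s) :: tl') hGtl
          have edpop : popLoop (decStack ((q1, q2) :: (w, s) :: tl')) x 0
              = ((popLoop (decStack ((w, s) :: tl')) x 0).1,
                 max (q2 - 1) (popLoop (decStack ((w, s) :: tl')) x 0).2) := by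
            rw [edec]
            simp only [popLoop, if_pos hvx]
            rw [popLoop_acc _ x (max 0 (q2 - 1)) (le_max_left _ _) hdect]
            refine Prod.ext rfl ?_
            have h2 : 0 ≤ (popLoop (decStack ((w, s) :: tl')) x 0).2 := by
              rcases hpp : popLoop (decStack ((w, s) :: tl')) x 0 with ⟨RR, mm⟩
              have := popLoop_acc (decStack ((w, s) :: tl')) x 0 le_rfl hdect
              rw [hpp] at this
              have := congrArg Prod.snd this
              simp only at this
              omega
            simp only
            omega
          by_cases hR0 : R₀ = []
          · obtain ⟨ed, hm0⟩ := IH'.1 hR0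
            refine ⟨fun _ => ⟨?_, ?_⟩, fun hne => ?_⟩
            · rw [edpop, ed, eS]
              refine Prod.ext rfl ?_
              simp only
              omega
            · rw [eS]; simp; omega
            · rw [eS] at hne; simp [hR0] at hne
          · obtain ⟨ed, hm1⟩ := IH'.2 hR0
            refine ⟨fun hc => ?_, fun _ => ⟨?_, ?_⟩⟩
            · rw [eS] at hc; exact absurd hc hR0
            · rw [edpop, ed, eS]
              refine Prod.ext rfl ?_
              simp only
              omega
            · rw [eS]; simp; omega
      · -- the next entry blocks: everything below stays
        have hall : ∀ p ∈ ((w, s) :: tl'), x < p.1 := by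
          intro p hp
          rcases List.mem_cons.mp hp with hp | hp
          · subst hp; exact not_le.mp hw
          · exact lt_trans (not_le.mp hw) (GoodStack_head_lt w s tl' hGtl p hp)
        have eS : popLoop ((q1, q2) :: (w, s) :: tl') x 0 = ((w, s) :: tl', q2) := by
          rw [e0, popLoop_noPop _ x q2 hall]
        have halld : ∀ p ∈ decStack ((w, s) :: tl'), x < p.1 :=
          decStack_vals ((w, s) :: tl') x hall
        refine ⟨fun hc => ?_, fun _ => ⟨?_, ?_⟩⟩
        · rw [eS] at hc; simp at hc
        · rw [eS]
          by_cases ht2 : q2 = 1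
          · have edec : decStack ((q1, q2) :: (w, s) :: tl')
                = decStack ((w, s) :: tl') := by simp [decStack, ht2]
            rw [edec, popLoop_noPop _ x 0 halld]
            refine Prod.ext rfl ?_
            simp only
            omega
          · have edec : decStack ((q1, q2) :: (w, s) :: tl')
                = (q1, q2 - 1) :: decStack ((w, s) :: tl') := by simp [decStack, ht2]
            rw [edec]
            simp only [popLoop, if_pos hvx]
            rw [popLoop_noPop _ x (max 0 (q2 - 1)) halld]
            refine Prod.ext rfl ?_
            simp only
            omega
        · rw [eS]; simp; omega

lemma pvKeep_append (p : Int) (t : List Int) (x : Int) :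
    pvKeep p (t ++ [x]) = pvKeep p t ++ (if t.getLastD p ≤ x then [x] else []) := by
  induction t generalizing p with
  | nil => simp [pvKeep]
  | cons y t' ih =>
    simp only [List.cons_append, pvKeep, List.getLastD_cons]
    split
    · rw [ih y]; simp
    · exact ih y

lemma pvRound_append (l : List Int) (x : Int) (h : l ≠ []) :
    pvRound (l ++ [x]) = pvRound l ++ (if l.getLastD 0 ≤ x then [x] else []) := by
  cases l with
  | nil => exact absurd rfl h
  | cons y t =>
    simp only [List.cons_append, pvRound, List.getLastD_cons]
    rw [pvKeep_append]

-- the main invariant, by induction on the list from the right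
lemma invariant (l : List Int) :
    GoodStack (foldA l).1 ∧
    (foldA l).1.head?.map Prod.fst = l.getLast? ∧
    0 ≤ (foldA l).2 ∧
    foldA (pvRound l) = (decStack (foldA l).1, max ((foldA l).2 - 1) 0) := by
  induction l using List.reverseRecOn with
  | nil =>
    refine ⟨trivial, by simp [foldA], le_rfl, ?_⟩
    show foldA (pvRound []) = (decStack (foldA []).1, max ((foldA []).2 - 1) 0)
    simp [foldA, pvRound, decStack]
  | append_singleton l x IH =>
    obtain ⟨hG, hHead, hA, hR⟩ := IH
    rcases hfa : foldA l with ⟨S, a⟩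
    rw [hfa] at hG hHead hA hR
    simp only at hG hHead hA hR
    rcases S with _ | ⟨⟨p, tp⟩, S₀⟩
    · -- empty stack: l = []
      have hl : l = [] := by
        simp only [List.head?_nil, Option.map_none] at hHead
        exact List.getLast?_eq_none_iff.mp hHead.symm
      subst hl
      have hx1 : foldA [x] = ([(x, 0)], 0) := by
        simp [foldA, stepA, popLoop]
      have hx2 : pvRound [x] = [x] := by simp [pvRound, pvKeep]
      simp only [List.nil_append]
      refine ⟨?_, ?_, ?_, ?_⟩
      · rw [hx1]; exact le_rfl
      · rw [hx1]; simp
      · rw [hx1]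
      · rw [hx2, hx1]
        norm_num [decStack]
    · have hp_last' : some p = l.getLast? := by simpa using hHead
      have hp_last : l.getLast? = some p := hp_last'.symm
      have hl_ne : l ≠ [] := by rintro rfl; simp at hp_last
      have hlast_getD : l.getLastD 0 = p := by
        rw [List.getLastD_eq_getLast?, hp_last]; rfl
      have hGlast : (l ++ [x]).getLast? = some x := List.getLast?_concat
      rw [foldA_append, hfa]
      by_cases hpx : p ≤ x
      · -- x ≥ last element: x is kept by the round, pops happen on the stack
        rcases hpl : popLoop ((p, tp) :: S₀) x 0 with ⟨R, m⟩
        have hPB := popBoth x ((p, tp) :: S₀) hG p tp S₀ rfl hpx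
        rw [hpl] at hPB
        rw [stepA_eq _ R a m x hpl]
        have hround : pvRound (l ++ [x]) = pvRound l ++ [x] := by
          rw [pvRound_append l x hl_ne, hlast_getD, if_pos hpx]
        by_cases hRnil : R = []
        · obtain ⟨ed, hm0⟩ := hPB.1 hRnil
          subst hRnil
          simp only [ne_eq, not_true_eq_false, if_false]
          refine ⟨hm0, by simp [hGlast], by omega, ?_⟩
          rw [hround, foldA_append, hR, stepA_eq _ [] (max (a - 1) 0) (max (m - 1) 0) x ed]
          simp only [ne_eq, not_true_eq_false, if_false]
          show ([(x, max (m - 1) 0)], max (max (a - 1) 0) (max (m - 1) 0))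
              = (decStack [(x, m)], max (max a m - 1) 0)
          show ([(x, max (m - 1) 0)], max (max (a - 1) 0) (max (m - 1) 0))
              = ([(x, max (m - 1) 0)], max (max a m - 1) 0)
          refine Prod.ext rfl ?_
          simp only
          omega
        · obtain ⟨ed, hm1⟩ := hPB.2 hRnil
          have hdR : decStack R ≠ [] := decStack_ne_nil R hRnil
          rw [if_pos hRnil]
          rcases R with _ | ⟨⟨w, s⟩, T⟩
          · exact absurd rfl hRnil
          · have hxw : x < w := popLoop_head_gt x ((p, tp) :: S₀) 0 w s T (by rw [hpl])
            have hGR : GoodStack ((w, s) :: T) := by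
              have := popLoop_good ((p, tp) :: S₀) x hG 0
              rw [hpl] at this
              exact this
            refine ⟨⟨hxw, by omega, hGR⟩, by simp [hGlast], by omega, ?_⟩
            rw [hround, foldA_append, hR,
              stepA_eq _ (decStack ((w, s) :: T)) (max (a - 1) 0) (m - 1) x ed,
              if_pos hdR]
            have hdec : decStack ((x, m + 1) :: (w, s) :: T)
                = (x, m + 1 - 1) :: decStack ((w, s) :: T) := by
              simp [decStack, show m + 1 ≠ 1 by omega]
            rw [hdec]
            refine Prod.ext ?_ ?_
            · show (x, m - 1 + 1) :: decStack ((w, s) :: T)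
                  = (x, m + 1 - 1) :: decStack ((w, s) :: T)
              norm_num
            · show max (max (a - 1) 0) (m - 1 + 1) = max (max a (m + 1) - 1) 0
              omega
      · -- x < last element: x is dropped by the round, no pops on the stack
        have hpl : popLoop ((p, tp) :: S₀) x 0 = ((p, tp) :: S₀, 0) := by
          simp [popLoop, hpx]
        rw [stepA_eq _ ((p, tp) :: S₀) a 0 x hpl, if_pos (by simp)]
        have hround : pvRound (l ++ [x]) = pvRound l := by
          rw [pvRound_append l x hl_ne, hlast_getD, if_neg hpx, List.append_nil]
        refine ⟨⟨not_le.mp hpx, le_rfl, hG⟩, by simp [hGlast], by omega, ?_⟩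
        rw [hround, hR]
        have hdec : decStack ((x, 0 + 1) :: (p, tp) :: S₀) = decStack ((p, tp) :: S₀) := by
          simp [decStack]
        rw [hdec]
        refine Prod.ext rfl ?_
        show max (a - 1) 0 = max (max a (0 + 1) - 1) 0
        omega

lemma ans_zero_of_fix (l : List Int) (h : pvRound l = l) : (foldA l).2 = 0 := by
  obtain ⟨_, _, ha, hr⟩ := invariant l
  rw [h] at hr
  have := congrArg Prod.snd hr
  simp only at this
  omega

lemma stepA_snd_ge (S : List (Int × Int)) (a x : Int) : a ≤ (stepA (S, a) x).2 := by
  rcases h : popLoop S x 0 with ⟨R, m⟩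
  rw [stepA_eq S R a m x h]
  exact le_max_left _ _

lemma one_le_ans_of_not_fix : ∀ (l : List Int), pvRound l ≠ l → 1 ≤ (foldA l).2 := by
  intro l
  induction l using List.reverseRecOn with
  | nil => intro h; simp [pvRound] at h
  | append_singleton l x IH =>
    intro h
    by_cases hfix : pvRound l = l
    · -- the new element x is the one being dropped: x < last l
      have hl_ne : l ≠ [] := by rintro rfl; simp [pvRound, pvKeep] at h
      by_cases hle : l.getLastD 0 ≤ x
      · rw [pvRound_append l x hl_ne, if_pos hle, hfix] at h
        exact absurd rfl h
      · obtain ⟨hG, hHead, hA, hR⟩ := invariant l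
        rcases hfa : foldA l with ⟨S, a⟩
        rw [hfa] at hHead hA
        simp only at hHead hA
        rcases S with _ | ⟨⟨p, tp⟩, S₀⟩
        · exfalso
          simp only [List.head?_nil, Option.map_none] at hHead
          exact hl_ne (List.getLast?_eq_none_iff.mp hHead.symm)
        · have hp_last' : some p = l.getLast? := by simpa using hHead
          have hpd : l.getLastD 0 = p := by
            rw [List.getLastD_eq_getLast?, ← hp_last']; rfl
          have hpx : ¬ p ≤ x := hpd ▸ hle
          have hpl : popLoop ((p, tp) :: S₀) x 0 = ((p, tp) :: S₀, 0) := by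
            simp [popLoop, hpx]
          rw [foldA_append, hfa, stepA_eq _ ((p, tp) :: S₀) a 0 x hpl,
            if_pos (by simp)]
          have : ((x, 0 + 1) :: (p, tp) :: S₀, max a (0 + 1)).2 = max a 1 := by norm_num
          rw [this]
          exact le_max_right _ _
    · have h1 := IH hfix
      rcases hfa : foldA l with ⟨S, a⟩
      rw [hfa] at h1
      simp only at h1
      calc (1 : Int) ≤ a := h1
        _ ≤ (foldA (l ++ [x])).2 := by
            rw [foldA_append, hfa]
            exact stepA_snd_ge S a x

lemma A_eq_sim : ∀ (n : ℕ) (l : List Int), l.length = n → totalSteps l = totalSteps_alt l := by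
  intro n
  induction n using Nat.strong_induction_on with
  | _ n IH =>
    intro l hl
    by_cases h : pvRound l = l
    · rw [totalSteps_alt]
      simp only [h, dif_pos]
      have := ans_zero_of_fix l h
      simpa [totalSteps, foldA] using this
    · rw [totalSteps_alt]
      simp only [h, dif_neg, not_false_iff]
      have hlt : (pvRound l).length < n := hl ▸ pvRound_length_lt l h
      rw [← IH _ hlt (pvRound l) rfl]
      obtain ⟨_, _, ha, hr⟩ := invariant l
      have h1 := one_le_ans_of_not_fix l h
      have := congrArg Prod.snd hr
      simp only at this
      show (totalSteps l : Int) = 1 + totalSteps (pvRound l)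
      simp only [totalSteps]
      have e1 : (List.foldl stepA ([], 0) l).2 = (foldA l).2 := rfl
      have e2 : (List.foldl stepA ([], 0) (pvRound l)).2 = (foldA (pvRound l)).2 := rfl
      rw [e1, e2, this]
      omega

-- ===== VERDICT (by name: the statement is the Claim_ definition above) =====
theorem totalSteps_spec : Claim_equal_totalSteps := by
  intro nums _
  show totalSteps nums = totalSteps_alt nums
  exact A_eq_sim nums.length nums rfl
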